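-- pv_equiv track=rewrite | github.com/Agentic-Environmental-Engineering/GymVerse | gem/gem/envs/RLVE/taking_prime_game_env.py | _compute_dp
-- ===== SOURCE A (Python) =====
-- from typing import Any, Optional, SupportsFloat, Tuple, List
--
-- def _compute_dp(max_n: int, primes: List[int]) -> Tuple[List[bool], List[int]]:
--     """
--     Compute DP arrays:
--     - win[i]: whether the current player has a winning strategy with i stones.
--     - dp_moves[i]: if win[i] is True, the minimum number of moves to force a win;
--                    otherwise, the maximum number of moves to delay the loss,
--                    under optimal play.
--     """
--     win = [False] * (max_n + 1)
--     dp_moves = [0] * (max_n + 1)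
--
--     # Base cases:
--     # i = 0: losing position, dp_moves[0] = 0
--     # i = 1: losing position (no prime move), dp_moves[1] = 0
--
--     for i in range(2, max_n + 1):
--         min_moves = (max_n + 1) * 100
--         max_moves = 0
--         has_winning_move = False
--
--         for p in primes:
--             if p > i:
--                 break
--             if not win[i - p]:
--                 has_winning_move = True
--                 # Move to a losing state for the opponent; minimize total moves to win
--                 min_moves = min(min_moves, dp_moves[i - p] + 1)
--             else:
--                 # Move to a winning state for the opponent; maximize delay
--                 max_moves = max(max_moves, dp_moves[i - p] + 1)
--
--         if has_winning_move:
--             win[i] = True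
--             dp_moves[i] = min_moves
--         else:
--             win[i] = False
--             dp_moves[i] = max_moves
--
--     return win, dp_moves
-- ===== SOURCE B (Python) =====
-- from typing import List, Tuple
--
-- def _compute_dp(max_n: int, primes: List[int]) -> Tuple[List[bool], List[int]]:
--     """
--     Forward (push) DP over positions 0..max_n: once a position is finalized it
--     pushes candidate move counts to its successors.
--     - win[i]: whether the player to move wins with i stones.
--     - moves[i]: minimum moves to win if winning, else maximum moves to delay.
--     """
--     win = [False] * (max_n + 1)
--     moves = [0] * (max_n + 1)
--     if max_n < 2:
--         return win, moves
--     size = max_n + 1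
--     INF = size * 100
--     best = [INF] * size   # minimal winning-move-count candidates pushed so far
--     delay = [0] * size    # maximal delaying-move-count candidates pushed so far
--     for i in range(size):
--         if i >= 2:
--             if best[i] < INF:
--                 win[i] = True
--                 moves[i] = best[i]
--             else:
--                 moves[i] = delay[i]
--         step = moves[i] + 1
--         if win[i]:
--             for p in primes:
--                 j = i + p
--                 if j < size and delay[j] < step:
--                     delay[j] = step
--         else:
--             for p in primes:
--                 j = i + p
--                 if j < size and step < best[j]:
--                     best[j] = step
--     return win, moves
-- ===== Notes on version B (the rewrite author's own statement) =====
-- stated objective: alternative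
-- what changed: The backward (pull) DP, whose inner loop reads predecessors win[i-p]/dp_moves[i-p] with an early break, is replaced by a forward (push) DP that finalizes each position in turn and pushes its min-win / max-delay candidates to the successor positions i+p; Pre_ excludes, for max_n >= 2, prime lists that are unsorted or contain entries < 1, where A raises IndexError or its value is an artefact of the early break / in-place update order that assumes the ascending sieve input.
-- outside the precondition, e.g. on _compute_dp(2, [3, -9]): A returns ([False, False, False], [0, 0, 0]), B raises IndexError; on _compute_dp(2, [-1]): A raises IndexError, B returns ([False, False, True], [0, 0, 1])
import Mathlib
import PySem

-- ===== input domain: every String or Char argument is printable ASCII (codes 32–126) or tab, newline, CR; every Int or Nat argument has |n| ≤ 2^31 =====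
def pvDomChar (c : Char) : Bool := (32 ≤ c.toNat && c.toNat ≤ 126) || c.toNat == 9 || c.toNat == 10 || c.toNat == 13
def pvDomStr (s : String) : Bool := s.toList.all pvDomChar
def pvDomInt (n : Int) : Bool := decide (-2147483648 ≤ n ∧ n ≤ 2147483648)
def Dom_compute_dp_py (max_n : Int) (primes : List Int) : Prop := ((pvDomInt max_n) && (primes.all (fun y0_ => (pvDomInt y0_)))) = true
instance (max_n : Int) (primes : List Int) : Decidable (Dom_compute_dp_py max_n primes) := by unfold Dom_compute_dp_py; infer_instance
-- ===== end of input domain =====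

-- B replaces A's backward (pull) DP, whose inner loop reads predecessors, by a forward (push) DP
-- that finalizes each position and pushes candidate move counts to its successors ("alternative").

-- ===== PORT A =====
-- inner loop over primes with early break (`if p > i: break`); reads win/dp at i-p
-- (in-range for every input admitted by Pre_, where pyGetD is exact)
def innerA (win : List Bool) (dp : List Int) (i : Int) : List Int → Int × Int × Bool → Int × Int × Bool
  | [], st => st
  | p :: ps, (mn, mx, has) =>
    if p > i then (mn, mx, has)
    else
      if !(PySem.List.pyGetD win (i - p) false) then
        innerA win dp i ps (min mn (PySem.List.pyGetD dp (i - p) 0 + 1), mx, true)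
      else
        innerA win dp i ps (mn, max mx (PySem.List.pyGetD dp (i - p) 0 + 1), has)

-- writing back win[i], dp_moves[i] from the inner-loop result (min_moves, max_moves, has)
def writeA (st : List Bool × List Int) (i : Int) (r : Int × Int × Bool) : List Bool × List Int :=
  if r.2.2 then (st.1.set i.toNat true, st.2.set i.toNat r.1)
  else (st.1.set i.toNat false, st.2.set i.toNat r.2.1)

def stepA (max_n : Int) (primes : List Int) (st : List Bool × List Int) (i : Int) : List Bool × List Int :=
  writeA st i (innerA st.1 st.2 i primes ((max_n + 1) * 100, 0, false))

def compute_dp_py (max_n : Int) (primes : List Int) : List Bool × List Int :=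
  (PySem.List.pyRange 2 (max_n + 1) 1).foldl (stepA max_n primes)
    (List.replicate (max_n + 1).toNat false, List.replicate (max_n + 1).toNat 0)

-- ===== PORT B =====
-- push loop over primes updating best (min); in-range writes, guarded by j < size
def pushMin (size base i : Int) (ps : List Int) (best : List Int) : List Int :=
  ps.foldl (fun best p =>
    let j := i + p
    if j < size ∧ base < PySem.List.pyGetD best j 0 then PySem.List.pySetD best j base else best) best

-- push loop over primes updating delay (max)
def pushMax (size base i : Int) (ps : List Int) (delay : List Int) : List Int :=
  ps.foldl (fun delay p =>
    let j := i + p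
    if j < size ∧ PySem.List.pyGetD delay j 0 < base then PySem.List.pySetD delay j base else delay) delay

-- finalize phase of one source i: fix win[i], moves[i] from best[i]/delay[i]
def finalizeB (size : Int) (wm : List Bool × List Int) (bd : List Int × List Int) (i : Int) :
    List Bool × List Int :=
  if 2 ≤ i then
    if PySem.List.pyGetD bd.1 i 0 < size * 100 then
      (wm.1.set i.toNat true, wm.2.set i.toNat (PySem.List.pyGetD bd.1 i 0))
    else (wm.1, wm.2.set i.toNat (PySem.List.pyGetD bd.2 i 0))
  else wm

-- push phase of one source i: push moves[i]+1 to the successors of i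
def pushB (size : Int) (ps : List Int) (bd : List Int × List Int)
    (wm : List Bool × List Int) (i : Int) :
    (List Bool × List Int) × (List Int × List Int) :=
  if PySem.List.pyGetD wm.1 i false then
    (wm, (bd.1, pushMax size (PySem.List.pyGetD wm.2 i 0 + 1) i ps bd.2))
  else
    (wm, (pushMin size (PySem.List.pyGetD wm.2 i 0 + 1) i ps bd.1, bd.2))

def stepB (size : Int) (ps : List Int)
    (st : (List Bool × List Int) × (List Int × List Int)) (i : Int) :
    (List Bool × List Int) × (List Int × List Int) :=
  pushB size ps st.2 (finalizeB size st.1 st.2 i) i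

def compute_dp_py_alt (max_n : Int) (primes : List Int) : List Bool × List Int :=
  let win := List.replicate (max_n + 1).toNat false
  let moves := List.replicate (max_n + 1).toNat 0
  if max_n < 2 then (win, moves)
  else
    let size := max_n + 1
    let best := List.replicate size.toNat (size * 100)
    let delay := List.replicate size.toNat 0
    ((PySem.List.pyRange 0 size 1).foldl (stepB size primes) ((win, moves), (best, delay))).1

-- ===== PRECONDITION & SPEC =====
-- Pre_ excludes, for max_n ≥ 2, prime lists that are unsorted or contain an entry < 1: a negative
-- entry makes A read past the end of its arrays (IndexError) on most such inputs, an entry 0 makes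
-- A read win[i] in the middle of updating position i, and on an unsorted list A's early break
-- silently ignores every prime after the first one exceeding i — an artefact of A assuming the
-- ascending sieve order its caller supplies.
def Pre_compute_dp_py (max_n : Int) (primes : List Int) : Prop :=
  max_n ≤ 1 ∨ (List.Pairwise (· ≤ ·) primes ∧ ∀ p ∈ primes, 1 ≤ p)
instance (max_n : Int) (primes : List Int) : Decidable (Pre_compute_dp_py max_n primes) := by
  unfold Pre_compute_dp_py; infer_instance

def pvWitness_compute_dp_py : Int × List Int := (10, [2, 3, 5, 7])

def Spec_compute_dp_py (max_n : Int) (primes : List Int) (out : List Bool × List Int) : Prop := out = compute_dp_py_alt max_n primes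
instance (max_n : Int) (primes : List Int) (out : List Bool × List Int) : Decidable (Spec_compute_dp_py max_n primes out) := by unfold Spec_compute_dp_py; infer_instance

-- ===== CLAIM (what is proved, stated in full; the proofs are below) =====
def Claim_equal_compute_dp_py : Prop := ∀ (max_n : Int) (primes : List Int), Dom_compute_dp_py max_n primes → Pre_compute_dp_py max_n primes → Spec_compute_dp_py max_n primes (compute_dp_py max_n primes)

-- ===== LEMMAS AND PROOFS =====

-- ---- generic fold facts (min/max accumulators) ----
lemma pvFoldlMinLeInit (l : List Int) (a : Int) : l.foldl min a ≤ a := by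
  induction l generalizing a with
  | nil => exact le_refl a
  | cons x xs ih => exact le_trans (ih (min a x)) (min_le_left a x)

lemma pvLeFoldlMin (l : List Int) (a c : Int) (hca : c ≤ a) (h : ∀ x ∈ l, c ≤ x) :
    c ≤ l.foldl min a := by
  induction l generalizing a with
  | nil => exact hca
  | cons x xs ih =>
    exact ih (min a x) (le_min hca (h x (by simp))) (fun y hy => h y (by simp [hy]))

lemma pvFoldlMinLeMem (l : List Int) (a x : Int) (hx : x ∈ l) : l.foldl min a ≤ x := by
  induction l generalizing a with
  | nil => cases hx
  | cons y ys ih =>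
    rcases List.mem_cons.mp hx with h | h
    · subst h; exact le_trans (pvFoldlMinLeInit ys (min a x)) (min_le_right a x)
    · exact ih (min a y) h

lemma pvFoldlMinLtIff (l : List Int) (a c : Int) :
    l.foldl min a < c ↔ a < c ∨ ∃ x ∈ l, x < c := by
  induction l generalizing a with
  | nil => simp
  | cons y ys ih =>
    rw [List.foldl_cons, ih (min a y)]
    constructor
    · rintro (h | ⟨x, hx, hxc⟩)
      · rcases min_lt_iff.mp h with h | h
        · exact Or.inl h
        · exact Or.inr ⟨y, by simp, h⟩
      · exact Or.inr ⟨x, by simp [hx], hxc⟩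
    · rintro (h | ⟨x, hx, hxc⟩)
      · exact Or.inl (min_lt_iff.mpr (Or.inl h))
      · rcases List.mem_cons.mp hx with h | h
        · subst h; exact Or.inl (min_lt_iff.mpr (Or.inr hxc))
        · exact Or.inr ⟨x, h, hxc⟩

lemma pvFoldlMinConst (l : List Int) (a v : Int) (h : ∀ x ∈ l, x = v) :
    l.foldl min a = if l.isEmpty then a else min a v := by
  induction l generalizing a with
  | nil => simp
  | cons y ys ih =>
    have hy : y = v := h y (by simp)
    subst hy
    rw [List.foldl_cons, ih (min a y) (fun x hx => h x (by simp [hx]))]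
    by_cases hys : ys.isEmpty <;> simp [hys]

lemma pvLeFoldlMax (l : List Int) (a : Int) : a ≤ l.foldl max a := by
  induction l generalizing a with
  | nil => exact le_refl a
  | cons x xs ih => exact le_trans (le_max_left a x) (ih (max a x))

lemma pvFoldlMaxLe (l : List Int) (a c : Int) (hca : a ≤ c) (h : ∀ x ∈ l, x ≤ c) :
    l.foldl max a ≤ c := by
  induction l generalizing a with
  | nil => exact hca
  | cons x xs ih =>
    exact ih (max a x) (max_le hca (h x (by simp))) (fun y hy => h y (by simp [hy]))

lemma pvFoldlMaxConst (l : List Int) (a v : Int) (h : ∀ x ∈ l, x = v) :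
    l.foldl max a = if l.isEmpty then a else max a v := by
  induction l generalizing a with
  | nil => simp
  | cons y ys ih =>
    have hy : y = v := h y (by simp)
    subst hy
    rw [List.foldl_cons, ih (max a y) (fun x hx => h x (by simp [hx]))]
    by_cases hys : ys.isEmpty <;> simp [hys]

-- ---- filter facts ----
lemma pvFilterIsEmpty {α : Type} (p : α → Bool) (l : List α) :
    (l.filter p).isEmpty = !l.any p := by
  induction l with
  | nil => rfl
  | cons x xs ih => by_cases h : p x <;> simp [h, ih]

lemma pvFilterOrPerm {α : Type} (p q : α → Bool) :
    ∀ (l : List α), (∀ x ∈ l, ¬(p x = true ∧ q x = true)) →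
      (l.filter (fun x => p x || q x)).Perm (l.filter p ++ l.filter q) := by
  intro l
  induction l with
  | nil => intro _; simp
  | cons x xs ih =>
    intro h
    have hxs := ih (fun y hy => h y (List.mem_cons_of_mem _ hy))
    cases hp : p x
    · cases hq : q x
      · simpa [List.filter_cons, hp, hq] using hxs
      · have hgoal := (hxs.cons x).trans (List.perm_middle (a := x)
          (l₁ := xs.filter p) (l₂ := xs.filter q)).symm
        simpa [List.filter_cons, hp, hq] using hgoal
    · have hq : q x = false := by
        cases hqq : q x
        · rfl
        · exact absurd ⟨hp, hqq⟩ (h x (by simp))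
      simpa [List.filter_cons, hp, hq] using hxs.cons x

-- sortedness turns A's early break (takeWhile) into the full scan's filter
lemma pvTakeWhileEqFilter (c : Int) :
    ∀ (l : List Int), List.Pairwise (· ≤ ·) l →
      l.takeWhile (fun p => decide (p ≤ c)) = l.filter (fun p => decide (p ≤ c)) := by
  intro l
  induction l with
  | nil => intro _; rfl
  | cons q ps ih =>
    intro h
    rcases List.pairwise_cons.mp h with ⟨hq, hps⟩
    by_cases hqc : q ≤ c
    · simp [hqc, ih hps]
    · have hnone : ps.filter (fun p => decide (p ≤ c)) = [] := by
        apply List.filter_eq_nil_iff.mpr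
        intro p hp
        simp only [decide_eq_true_eq]
        have := hq p hp
        omega
      simp [hqc, hnone]

-- ---- getD helpers ----
lemma pvGetDSetNeBool (l : List Bool) (i k : Nat) (b d : Bool) (h : i ≠ k) :
    (l.set i b).getD k d = l.getD k d := by
  rw [List.getD_eq_getElem?_getD, List.getD_eq_getElem?_getD, List.getElem?_set_ne h]

lemma pvGetDSetNeInt (l : List Int) (i k : Nat) (b d : Int) (h : i ≠ k) :
    (l.set i b).getD k d = l.getD k d := by
  rw [List.getD_eq_getElem?_getD, List.getD_eq_getElem?_getD, List.getElem?_set_ne h]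

lemma pvGetDSetSelfBool (l : List Bool) (i : Nat) (b d : Bool) (h : i < l.length) :
    (l.set i b).getD i d = b := by
  rw [List.getD_eq_getElem?_getD, List.getElem?_set_self (by omega)]
  simp

lemma pvGetDSetSelfInt (l : List Int) (i : Nat) (b d : Int) (h : i < l.length) :
    (l.set i b).getD i d = b := by
  rw [List.getD_eq_getElem?_getD, List.getElem?_set_self (by omega)]
  simp

lemma pvGetDReplicateBool (n k : Nat) (x : Bool) : (List.replicate n x).getD k x = x := by
  rcases Nat.lt_or_ge k n with h | h
  · exact List.getD_replicate x h
  · exact List.getD_eq_default _ _ (by simpa using h)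

lemma pvGetDReplicateInt (n k : Nat) (x : Int) : (List.replicate n x).getD k x = x := by
  rcases Nat.lt_or_ge k n with h | h
  · exact List.getD_replicate x h
  · exact List.getD_eq_default _ _ (by simpa using h)

-- ---- A-side state machinery ----
def AS (max_n : Int) (primes : List Int) (i : Nat) : List Bool × List Int :=
  (PySem.List.pyRange 2 (i : Int) 1).foldl (stepA max_n primes)
    (List.replicate (max_n + 1).toNat false, List.replicate (max_n + 1).toNat 0)

def nA (max_n : Int) : Nat := (max_n + 1).toNat

def WA (max_n : Int) (primes : List Int) (k : Nat) : Bool :=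
  (AS max_n primes (nA max_n)).1.getD k false
def DA (max_n : Int) (primes : List Int) (k : Nat) : Int :=
  (AS max_n primes (nA max_n)).2.getD k 0

def twA (primes : List Int) (i : Int) : List Int := primes.takeWhile (fun p => decide (p ≤ i))
def loseL (max_n : Int) (primes : List Int) (k : Nat) : List Int :=
  (twA primes k).filter (fun p => !(WA max_n primes ((k : Int) - p).toNat))
def winL (max_n : Int) (primes : List Int) (k : Nat) : List Int :=
  (twA primes k).filter (fun p => WA max_n primes ((k : Int) - p).toNat)
def hkA (max_n : Int) (primes : List Int) (k : Nat) (p : Int) : Int :=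
  DA max_n primes ((k : Int) - p).toNat + 1

lemma pvASNil (max_n : Int) (primes : List Int) (i : Nat) (h : i ≤ 2) :
    AS max_n primes i
      = (List.replicate (max_n + 1).toNat false, List.replicate (max_n + 1).toNat 0) := by
  unfold AS
  rw [PySem.List.pyRange_one_eq_nil (by exact_mod_cast h)]
  rfl

lemma pvASSucc (max_n : Int) (primes : List Int) (i : Nat) (h : 2 ≤ i) :
    AS max_n primes (i + 1) = stepA max_n primes (AS max_n primes i) (i : Int) := by
  unfold AS
  rw [show ((i + 1 : Nat) : Int) = (i : Int) + 1 by push_cast; ring]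
  rw [PySem.List.pyRange_one_succ_right (by exact_mod_cast h), List.foldl_append]
  rfl

lemma pvASLen (max_n : Int) (primes : List Int) :
    ∀ i : Nat, (AS max_n primes i).1.length = nA max_n ∧ (AS max_n primes i).2.length = nA max_n := by
  intro i
  induction i with
  | zero => rw [pvASNil max_n primes 0 (by omega)]; simp [nA]
  | succ n ih =>
    by_cases h : 2 ≤ n
    · rw [pvASSucc max_n primes n h]
      unfold stepA writeA
      split <;> constructor <;> simp [List.length_set, ih.1, ih.2]
    · rw [pvASNil max_n primes (n + 1) (by omega)]; simp [nA]

lemma pvASStable (max_n : Int) (primes : List Int) (i k : Nat) (hk : k < i ∨ k < 2) :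
    ∀ i', i ≤ i' →
      (AS max_n primes i').1.getD k false = (AS max_n primes i).1.getD k false ∧
      (AS max_n primes i').2.getD k 0 = (AS max_n primes i).2.getD k 0 := by
  intro i' hii
  induction i' with
  | zero =>
    have : i = 0 := by omega
    subst this; exact ⟨rfl, rfl⟩
  | succ m ih =>
    rcases Nat.lt_or_ge i (m + 1) with hlt | hge
    · have him : i ≤ m := by omega
      have H := ih him
      by_cases h2 : 2 ≤ m
      · have hkm : (((m : Int)).toNat : Nat) ≠ k := by omega
        rw [pvASSucc max_n primes m h2]
        unfold stepA writeA
        constructor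
        · split <;> rw [pvGetDSetNeBool _ _ _ _ _ hkm] <;> exact H.1
        · split <;> rw [pvGetDSetNeInt _ _ _ _ _ hkm] <;> exact H.2
      · rw [pvASNil max_n primes (m + 1) (by omega), ← pvASNil max_n primes i (by omega)]
        exact ⟨rfl, rfl⟩
    · have : i = m + 1 := by omega
      subst this; exact ⟨rfl, rfl⟩

lemma pvWABase (max_n : Int) (primes : List Int) (k : Nat) (hk : k < 2) :
    WA max_n primes k = false ∧ DA max_n primes k = 0 := by
  unfold WA DA
  have h := pvASStable max_n primes 0 k (Or.inr hk) (nA max_n) (Nat.zero_le _)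
  rw [h.1, h.2, pvASNil max_n primes 0 (by omega)]
  exact ⟨pvGetDReplicateBool _ _ _, pvGetDReplicateInt _ _ _⟩

lemma pvInnerAChar (win : List Bool) (dp : List Int) (i : Int) :
    ∀ (ps : List Int) (mn mx : Int) (has : Bool),
      innerA win dp i ps (mn, mx, has) =
        ((((ps.takeWhile (fun p => decide (p ≤ i))).filter
              (fun p => !(PySem.List.pyGetD win (i - p) false))).map
            (fun p => PySem.List.pyGetD dp (i - p) 0 + 1)).foldl min mn,
         (((ps.takeWhile (fun p => decide (p ≤ i))).filter
              (fun p => PySem.List.pyGetD win (i - p) false)).map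
            (fun p => PySem.List.pyGetD dp (i - p) 0 + 1)).foldl max mx,
         has || !((ps.takeWhile (fun p => decide (p ≤ i))).filter
              (fun p => !(PySem.List.pyGetD win (i - p) false))).isEmpty) := by
  intro ps
  induction ps with
  | nil => intro mn mx has; simp [innerA]
  | cons p ps ih =>
    intro mn mx has
    by_cases hpi : p > i
    · have hple : ¬ (p ≤ i) := by omega
      simp [innerA, hpi, hple]
    · have hple : p ≤ i := by omega
      by_cases hw : PySem.List.pyGetD win (i - p) false
      · simp [innerA, hpi, hw, hple, ih]
      · simp [innerA, hpi, hw, hple, ih]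

lemma pvTwAFacts (primes : List Int) (hP : ∀ p ∈ primes, 1 ≤ p) (i : Int) (p : Int)
    (hp : p ∈ primes.takeWhile (fun p => decide (p ≤ i))) : 1 ≤ p ∧ p ≤ i := by
  constructor
  · exact hP p ((List.takeWhile_sublist _).subset hp)
  · have := List.mem_takeWhile_imp hp
    simpa using this

lemma pvArec (max_n : Int) (primes : List Int) (hP : ∀ p ∈ primes, 1 ≤ p)
    (k : Nat) (h2 : 2 ≤ k) (hkn : k < nA max_n) :
    WA max_n primes k = !(loseL max_n primes k).isEmpty ∧
    DA max_n primes k =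
      (if (loseL max_n primes k).isEmpty
        then ((winL max_n primes k).map (hkA max_n primes k)).foldl max 0
        else ((loseL max_n primes k).map (hkA max_n primes k)).foldl min ((max_n + 1) * 100)) := by
  have hst := pvASStable max_n primes (k + 1) k (Or.inl (by omega)) (nA max_n) hkn
  have hlen := pvASLen max_n primes k
  have hread : ∀ p ∈ primes.takeWhile (fun p => decide (p ≤ (k : Int))),
      PySem.List.pyGetD (AS max_n primes k).1 ((k : Int) - p) false
          = WA max_n primes ((k : Int) - p).toNat ∧
      PySem.List.pyGetD (AS max_n primes k).2 ((k : Int) - p) 0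
          = DA max_n primes ((k : Int) - p).toNat := by
    intro p hp
    obtain ⟨hp1, hple⟩ := pvTwAFacts primes hP (k : Int) p hp
    have h0 : 0 ≤ (k : Int) - p := by omega
    have htn : ((k : Int) - p).toNat < k := by omega
    have hs := pvASStable max_n primes k (((k : Int) - p).toNat) (Or.inl htn) (nA max_n)
      (le_of_lt hkn)
    constructor
    · rw [PySem.List.pyGetD_of_nonneg _ _ h0]
      exact hs.1.symm
    · rw [PySem.List.pyGetD_of_nonneg _ _ h0]
      exact hs.2.symm
  have hfL : (primes.takeWhile (fun p => decide (p ≤ (k : Int)))).filter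
        (fun p => !(PySem.List.pyGetD (AS max_n primes k).1 ((k : Int) - p) false))
      = loseL max_n primes k := by
    unfold loseL twA
    exact List.filter_congr (fun p hp => by rw [(hread p hp).1])
  have hfW : (primes.takeWhile (fun p => decide (p ≤ (k : Int)))).filter
        (fun p => PySem.List.pyGetD (AS max_n primes k).1 ((k : Int) - p) false)
      = winL max_n primes k := by
    unfold winL twA
    exact List.filter_congr (fun p hp => by rw [(hread p hp).1])
  have hmapL : (loseL max_n primes k).map
        (fun p => PySem.List.pyGetD (AS max_n primes k).2 ((k : Int) - p) 0 + 1)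
      = (loseL max_n primes k).map (hkA max_n primes k) := by
    apply List.map_congr_left
    intro p hp
    have hp' : p ∈ primes.takeWhile (fun p => decide (p ≤ (k : Int))) := by
      have := List.mem_of_mem_filter hp
      simpa [loseL, twA] using this
    rw [(hread p hp').2]; rfl
  have hmapW : (winL max_n primes k).map
        (fun p => PySem.List.pyGetD (AS max_n primes k).2 ((k : Int) - p) 0 + 1)
      = (winL max_n primes k).map (hkA max_n primes k) := by
    apply List.map_congr_left
    intro p hp
    have hp' : p ∈ primes.takeWhile (fun p => decide (p ≤ (k : Int))) := by
      have := List.mem_of_mem_filter hp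
      simpa [winL, twA] using this
    rw [(hread p hp').2]; rfl
  have htn : (((k : Int)).toNat : Nat) = k := by omega
  unfold WA DA
  rw [hst.1, hst.2, pvASSucc max_n primes k h2]
  unfold stepA writeA
  rw [pvInnerAChar]
  simp only [Bool.false_or]
  rw [hfL, hfW, hmapL, hmapW, htn]
  by_cases hE : (loseL max_n primes k).isEmpty
  · rw [hE]
    simp only [Bool.not_true, Bool.false_eq_true, if_false, if_true]
    constructor
    · rw [pvGetDSetSelfBool _ _ _ _ (by rw [hlen.1]; exact hkn)]
    · rw [pvGetDSetSelfInt _ _ _ _ (by rw [hlen.2]; exact hkn)]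
  · rw [Bool.not_eq_true] at hE
    rw [hE]
    simp only [Bool.not_false, if_true, Bool.false_eq_true, if_false]
    constructor
    · rw [pvGetDSetSelfBool _ _ _ _ (by rw [hlen.1]; exact hkn)]
    · rw [pvGetDSetSelfInt _ _ _ _ (by rw [hlen.2]; exact hkn)]

lemma pvDAOut (max_n : Int) (primes : List Int) (k : Nat) (hk : nA max_n ≤ k) :
    WA max_n primes k = false ∧ DA max_n primes k = 0 := by
  unfold WA DA
  have h := pvASLen max_n primes (nA max_n)
  constructor
  · exact List.getD_eq_default _ _ (by omega)
  · exact List.getD_eq_default _ _ (by omega)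

lemma pvDABound (max_n : Int) (primes : List Int) (hm : 2 ≤ max_n) (hP : ∀ p ∈ primes, 1 ≤ p) :
    ∀ k : Nat, 0 ≤ DA max_n primes k ∧ DA max_n primes k ≤ (k : Int) := by
  intro k
  induction k using Nat.strong_induction_on with
  | _ k ih =>
    by_cases hk2 : k < 2
    · rw [(pvWABase max_n primes k hk2).2]
      exact ⟨le_refl 0, by exact_mod_cast Nat.zero_le k⟩
    · by_cases hkn : k < nA max_n
      · have harec := (pvArec max_n primes hP k (by omega) hkn).2
        have hval : ∀ p ∈ twA primes (k : Int),
            1 ≤ hkA max_n primes k p ∧ hkA max_n primes k p ≤ (k : Int) := by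
          intro p hp
          obtain ⟨hp1, hple⟩ := pvTwAFacts primes hP (k : Int) p hp
          have htn : ((k : Int) - p).toNat < k := by omega
          have hihb := ih _ htn
          unfold hkA
          constructor
          · omega
          · have : ((((k : Int) - p).toNat : Nat) : Int) ≤ (k : Int) - 1 := by omega
            omega
        rw [harec]
        by_cases hE : (loseL max_n primes k).isEmpty
        · rw [if_pos hE]
          constructor
          · exact le_trans (le_refl 0) (pvLeFoldlMax _ 0)
          · apply pvFoldlMaxLe
            · exact_mod_cast Nat.zero_le k
            · intro x hx
              rcases List.mem_map.mp hx with ⟨p, hp, rfl⟩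
              have hp' : p ∈ twA primes (k : Int) := List.mem_of_mem_filter hp
              exact (hval p hp').2
        · rw [if_neg hE]
          constructor
          · apply pvLeFoldlMin
            · omega
            · intro x hx
              rcases List.mem_map.mp hx with ⟨p, hp, rfl⟩
              have hp' : p ∈ twA primes (k : Int) := List.mem_of_mem_filter hp
              have := (hval p hp').1; omega
          · rcases List.exists_mem_of_ne_nil (loseL max_n primes k)
                (by simpa [List.isEmpty_iff] using hE) with ⟨p, hp⟩
            have hp' : p ∈ twA primes (k : Int) := List.mem_of_mem_filter hp
            exact le_trans
              (pvFoldlMinLeMem _ _ _ (List.mem_map_of_mem hp))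
              (hval p hp').2
      · rw [(pvDAOut max_n primes k (by omega)).2]
        exact ⟨le_refl 0, by exact_mod_cast Nat.zero_le k⟩

-- ---- B-side state machinery ----
def BS (max_n : Int) (primes : List Int) (s : Nat) : (List Bool × List Int) × (List Int × List Int) :=
  (PySem.List.pyRange 0 (s : Int) 1).foldl (stepB (max_n + 1) primes)
    ((List.replicate (max_n + 1).toNat false, List.replicate (max_n + 1).toNat 0),
     (List.replicate (max_n + 1).toNat ((max_n + 1) * 100), List.replicate (max_n + 1).toNat 0))

def selMin (max_n : Int) (primes : List Int) (s k : Nat) : List Int :=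
  primes.filter (fun p =>
    decide (p ≤ (k : Int)) && decide ((k : Int) - p < (s : Int)) &&
    !(WA max_n primes ((k : Int) - p).toNat))
def selMax (max_n : Int) (primes : List Int) (s k : Nat) : List Int :=
  primes.filter (fun p =>
    decide (p ≤ (k : Int)) && decide ((k : Int) - p < (s : Int)) &&
    (WA max_n primes ((k : Int) - p).toNat))
def bestSpec (max_n : Int) (primes : List Int) (s k : Nat) : Int :=
  ((selMin max_n primes s k).map (fun p => DA max_n primes ((k : Int) - p).toNat + 1)).foldl
    min ((max_n + 1) * 100)
def delaySpec (max_n : Int) (primes : List Int) (s k : Nat) : Int :=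
  ((selMax max_n primes s k).map (fun p => DA max_n primes ((k : Int) - p).toNat + 1)).foldl
    max 0

lemma pvBSZero (max_n : Int) (primes : List Int) :
    BS max_n primes 0
      = ((List.replicate (max_n + 1).toNat false, List.replicate (max_n + 1).toNat 0),
         (List.replicate (max_n + 1).toNat ((max_n + 1) * 100), List.replicate (max_n + 1).toNat 0)) := by
  unfold BS
  rw [PySem.List.pyRange_one_eq_nil (by omega)]
  rfl

lemma pvBSSucc (max_n : Int) (primes : List Int) (s : Nat) :
    BS max_n primes (s + 1)
      = stepB (max_n + 1) primes (BS max_n primes s) (s : Int) := by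
  unfold BS
  rw [show ((s + 1 : Nat) : Int) = (s : Int) + 1 by push_cast; ring]
  rw [PySem.List.pyRange_one_succ_right (by exact_mod_cast Nat.zero_le s), List.foldl_append]
  rfl

lemma pvBestSpecZero (max_n : Int) (primes : List Int) (hP : ∀ p ∈ primes, 1 ≤ p) (k : Nat) :
    bestSpec max_n primes 0 k = (max_n + 1) * 100 := by
  unfold bestSpec selMin
  have h : ∀ p ∈ primes,
      (decide (p ≤ (k : Int)) && decide ((k : Int) - p < ((0 : Nat) : Int)) &&
        !(WA max_n primes ((k : Int) - p).toNat)) = false := by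
    intro p hp
    by_cases h1 : p ≤ (k : Int)
    · have h2 : decide ((k : Int) - p < ((0 : Nat) : Int)) = false :=
        decide_eq_false (by have := hP p hp; push_cast; omega)
      rw [h2, Bool.and_false, Bool.false_and]
    · rw [decide_eq_false h1, Bool.false_and, Bool.false_and]
  rw [List.filter_congr h]
  simp

lemma pvDelaySpecZero (max_n : Int) (primes : List Int) (hP : ∀ p ∈ primes, 1 ≤ p) (k : Nat) :
    delaySpec max_n primes 0 k = 0 := by
  unfold delaySpec selMax
  have h : ∀ p ∈ primes,
      (decide (p ≤ (k : Int)) && decide ((k : Int) - p < ((0 : Nat) : Int)) &&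
        (WA max_n primes ((k : Int) - p).toNat)) = false := by
    intro p hp
    by_cases h1 : p ≤ (k : Int)
    · have h2 : decide ((k : Int) - p < ((0 : Nat) : Int)) = false :=
        decide_eq_false (by have := hP p hp; push_cast; omega)
      rw [h2, Bool.and_false, Bool.false_and]
    · rw [decide_eq_false h1, Bool.false_and, Bool.false_and]
  rw [List.filter_congr h]
  simp

lemma pvSelMinSelf (max_n : Int) (primes : List Int) (hS : List.Pairwise (· ≤ ·) primes)
    (hP : ∀ p ∈ primes, 1 ≤ p) (s : Nat) :
    (selMin max_n primes s s).map (fun p => DA max_n primes ((s : Int) - p).toNat + 1)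
      = (loseL max_n primes s).map (hkA max_n primes s) := by
  unfold selMin
  have hcong : ∀ p ∈ primes,
      (decide (p ≤ (s : Int)) && decide ((s : Int) - p < (s : Int)) &&
        !(WA max_n primes ((s : Int) - p).toNat))
      = (!(WA max_n primes ((s : Int) - p).toNat) && decide (p ≤ (s : Int))) := by
    intro p hp
    have h1 : 1 ≤ p := hP p hp
    have h2 : decide ((s : Int) - p < (s : Int)) = true := decide_eq_true (by omega)
    rw [h2, Bool.and_true, Bool.and_comm]
  rw [List.filter_congr hcong, ← List.filter_filter, ← pvTakeWhileEqFilter (s : Int) primes hS]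
  rfl

lemma pvSelMaxSelf (max_n : Int) (primes : List Int) (hS : List.Pairwise (· ≤ ·) primes)
    (hP : ∀ p ∈ primes, 1 ≤ p) (s : Nat) :
    (selMax max_n primes s s).map (fun p => DA max_n primes ((s : Int) - p).toNat + 1)
      = (winL max_n primes s).map (hkA max_n primes s) := by
  unfold selMax
  have hcong : ∀ p ∈ primes,
      (decide (p ≤ (s : Int)) && decide ((s : Int) - p < (s : Int)) &&
        (WA max_n primes ((s : Int) - p).toNat))
      = ((WA max_n primes ((s : Int) - p).toNat) && decide (p ≤ (s : Int))) := by
    intro p hp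
    have h1 : 1 ≤ p := hP p hp
    have h2 : decide ((s : Int) - p < (s : Int)) = true := decide_eq_true (by omega)
    rw [h2, Bool.and_true, Bool.and_comm]
  rw [List.filter_congr hcong, ← List.filter_filter, ← pvTakeWhileEqFilter (s : Int) primes hS]
  rfl

lemma pvPushMinCons (size base i : Int) (p : Int) (rest : List Int) (best : List Int) :
    pushMin size base i (p :: rest) best
      = pushMin size base i rest
          (if i + p < size ∧ base < PySem.List.pyGetD best (i + p) 0
            then PySem.List.pySetD best (i + p) base else best) := by
  unfold pushMin
  rw [List.foldl_cons]

lemma pvPushMaxCons (size base i : Int) (p : Int) (rest : List Int) (delay : List Int) :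
    pushMax size base i (p :: rest) delay
      = pushMax size base i rest
          (if i + p < size ∧ PySem.List.pyGetD delay (i + p) 0 < base
            then PySem.List.pySetD delay (i + p) base else delay) := by
  unfold pushMax
  rw [List.foldl_cons]

lemma pvPushMinLen (size base i : Int) :
    ∀ (ps : List Int) (best : List Int), (pushMin size base i ps best).length = best.length := by
  intro ps
  induction ps with
  | nil => intro best; rfl
  | cons p rest ih =>
    intro best
    rw [pvPushMinCons]
    rw [ih]
    split <;> simp [PySem.List.length_pySetD]

lemma pvPushMaxLen (size base i : Int) :
    ∀ (ps : List Int) (delay : List Int), (pushMax size base i ps delay).length = delay.length := by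
  intro ps
  induction ps with
  | nil => intro delay; rfl
  | cons p rest ih =>
    intro delay
    rw [pvPushMaxCons]
    rw [ih]
    split <;> simp [PySem.List.length_pySetD]

lemma pvPushMinGetD (size base i : Int) (hi : 0 ≤ i) :
    ∀ (ps : List Int) (best : List Int) (k : Nat),
      (∀ p ∈ ps, 1 ≤ p) → k < best.length → ((best.length : Int) = size) →
      (pushMin size base i ps best).getD k 0 =
        if ps.any (fun p => decide (i + p = (k : Int)))
        then min (best.getD k 0) base else best.getD k 0 := by
  intro ps
  induction ps with
  | nil => intro best k _ _ _; simp [pushMin]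
  | cons p rest ih =>
    intro best k hus hk hlen
    have h1 : 1 ≤ p := hus p (by simp)
    have hrest : ∀ x ∈ rest, 1 ≤ x := fun x hx => hus x (by simp [hx])
    have hj0 : 0 ≤ i + p := by omega
    rw [pvPushMinCons, PySem.List.pySetD_of_nonneg _ _ hj0]
    by_cases hjk : i + p = (k : Int)
    · have hkint : ((k : Int)) < size := by
        rw [← hlen]; exact_mod_cast hk
      have hjlt : i + p < size := by omega
      have htn : ((i + p).toNat : Nat) = k := by omega
      have hget : PySem.List.pyGetD best (i + p) 0 = best.getD k 0 := by
        rw [PySem.List.pyGetD_of_nonneg _ _ hj0, htn]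
      have hhead : (decide (i + p = (k : Int))) = true := decide_eq_true hjk
      rw [List.any_cons, hhead, Bool.true_or, if_pos rfl]
      by_cases hble : base < best.getD k 0
      · rw [if_pos ⟨hjlt, by rw [hget]; exact hble⟩, htn]
        rw [ih (best.set k base) k hrest (by rw [List.length_set]; exact hk)
          (by rw [List.length_set]; exact hlen)]
        rw [pvGetDSetSelfInt _ _ _ _ hk, min_self, ite_self,
          min_eq_right (le_of_lt hble)]
      · rw [if_neg (by rw [hget]; exact fun h => hble h.2)]
        rw [ih best k hrest hk hlen]
        rw [min_eq_left (by omega), ite_self]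
    · have hhead : (decide (i + p = (k : Int))) = false := decide_eq_false hjk
      have hne : ((i + p).toNat : Nat) ≠ k := by omega
      by_cases hcond : i + p < size ∧ base < PySem.List.pyGetD best (i + p) 0
      · rw [if_pos hcond]
        rw [ih (best.set (i + p).toNat base) k hrest (by rw [List.length_set]; exact hk)
          (by rw [List.length_set]; exact hlen)]
        rw [pvGetDSetNeInt _ _ _ _ _ hne, List.any_cons, hhead, Bool.false_or]
      · rw [if_neg hcond]
        rw [ih best k hrest hk hlen, List.any_cons, hhead, Bool.false_or]

lemma pvPushMaxGetD (size base i : Int) (hi : 0 ≤ i) :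
    ∀ (ps : List Int) (delay : List Int) (k : Nat),
      (∀ p ∈ ps, 1 ≤ p) → k < delay.length → ((delay.length : Int) = size) →
      (pushMax size base i ps delay).getD k 0 =
        if ps.any (fun p => decide (i + p = (k : Int)))
        then max (delay.getD k 0) base else delay.getD k 0 := by
  intro ps
  induction ps with
  | nil => intro delay k _ _ _; simp [pushMax]
  | cons p rest ih =>
    intro delay k hus hk hlen
    have h1 : 1 ≤ p := hus p (by simp)
    have hrest : ∀ x ∈ rest, 1 ≤ x := fun x hx => hus x (by simp [hx])
    have hj0 : 0 ≤ i + p := by omega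
    rw [pvPushMaxCons, PySem.List.pySetD_of_nonneg _ _ hj0]
    by_cases hjk : i + p = (k : Int)
    · have hkint : ((k : Int)) < size := by
        rw [← hlen]; exact_mod_cast hk
      have hjlt : i + p < size := by omega
      have htn : ((i + p).toNat : Nat) = k := by omega
      have hget : PySem.List.pyGetD delay (i + p) 0 = delay.getD k 0 := by
        rw [PySem.List.pyGetD_of_nonneg _ _ hj0, htn]
      have hhead : (decide (i + p = (k : Int))) = true := decide_eq_true hjk
      rw [List.any_cons, hhead, Bool.true_or, if_pos rfl]
      by_cases hble : delay.getD k 0 < base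
      · rw [if_pos ⟨hjlt, by rw [hget]; exact hble⟩, htn]
        rw [ih (delay.set k base) k hrest (by rw [List.length_set]; exact hk)
          (by rw [List.length_set]; exact hlen)]
        rw [pvGetDSetSelfInt _ _ _ _ hk, max_self, ite_self,
          max_eq_right (le_of_lt hble)]
      · rw [if_neg (by rw [hget]; exact fun h => hble h.2)]
        rw [ih delay k hrest hk hlen]
        rw [max_eq_left (by omega), ite_self]
    · have hhead : (decide (i + p = (k : Int))) = false := decide_eq_false hjk
      have hne : ((i + p).toNat : Nat) ≠ k := by omega
      by_cases hcond : i + p < size ∧ PySem.List.pyGetD delay (i + p) 0 < base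
      · rw [if_pos hcond]
        rw [ih (delay.set (i + p).toNat base) k hrest (by rw [List.length_set]; exact hk)
          (by rw [List.length_set]; exact hlen)]
        rw [pvGetDSetNeInt _ _ _ _ _ hne, List.any_cons, hhead, Bool.false_or]
      · rw [if_neg hcond]
        rw [ih delay k hrest hk hlen, List.any_cons, hhead, Bool.false_or]

lemma pvBestSpecSucc (max_n : Int) (primes : List Int) (s k : Nat) :
    bestSpec max_n primes (s + 1) k =
      if (!(WA max_n primes s)) && (primes.any (fun p => decide ((s : Int) + p = (k : Int))))
      then min (bestSpec max_n primes s k) (DA max_n primes s + 1)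
      else bestSpec max_n primes s k := by
  set f : Int → Int := fun p => DA max_n primes ((k : Int) - p).toNat + 1 with hf
  set pOld : Int → Bool := fun p =>
    decide (p ≤ (k : Int)) && decide ((k : Int) - p < (s : Int)) &&
      !(WA max_n primes ((k : Int) - p).toNat) with hpOld
  set pNew : Int → Bool := fun p =>
    decide (p ≤ (k : Int)) && decide ((k : Int) - p = (s : Int)) &&
      !(WA max_n primes ((k : Int) - p).toNat) with hpNew
  have hsplit : selMin max_n primes (s + 1) k = primes.filter (fun p => pOld p || pNew p) := by
    unfold selMin
    apply List.filter_congr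
    intro p _
    simp only [hpOld, hpNew]
    by_cases h2 : (k : Int) - p < (s : Int)
    · have h3 : ¬ ((k : Int) - p = (s : Int)) := by omega
      have hlt1 : decide ((k : Int) - p < ((s + 1 : Nat) : Int)) = true :=
        decide_eq_true (by push_cast; omega)
      rw [hlt1, decide_eq_true h2, decide_eq_false h3]
      cases hb1 : decide (p ≤ (k : Int)) <;>
        cases hb2 : (WA max_n primes ((k : Int) - p).toNat) <;> rfl
    · by_cases h3 : (k : Int) - p = (s : Int)
      · have hlt1 : decide ((k : Int) - p < ((s + 1 : Nat) : Int)) = true :=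
          decide_eq_true (by push_cast; omega)
        rw [hlt1, decide_eq_false h2, decide_eq_true h3]
        cases hb1 : decide (p ≤ (k : Int)) <;>
          cases hb2 : (WA max_n primes ((k : Int) - p).toNat) <;> rfl
      · have hlt1 : decide ((k : Int) - p < ((s + 1 : Nat) : Int)) = false :=
          decide_eq_false (by push_cast; omega)
        rw [hlt1, decide_eq_false h2, decide_eq_false h3]
        cases hb1 : decide (p ≤ (k : Int)) <;>
          cases hb2 : (WA max_n primes ((k : Int) - p).toNat) <;> rfl
  have hdisj : ∀ p ∈ primes, ¬ (pOld p = true ∧ pNew p = true) := by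
    rintro p _ ⟨hA, hB⟩
    simp only [hpOld, hpNew, Bool.and_eq_true, decide_eq_true_eq] at hA hB
    omega
  have hperm := (pvFilterOrPerm pOld pNew primes hdisj).map f
  have hfold : bestSpec max_n primes (s + 1) k
      = ((primes.filter pOld).map f ++ (primes.filter pNew).map f).foldl min ((max_n + 1) * 100) := by
    unfold bestSpec
    rw [hsplit]
    rw [hperm.foldl_eq, List.map_append]
  have hold : ((primes.filter pOld).map f).foldl min ((max_n + 1) * 100)
      = bestSpec max_n primes s k := rfl
  rw [hfold, List.foldl_append, hold]
  by_cases hW : WA max_n primes s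
  · have hnil : primes.filter pNew = [] := by
      have h0 : ∀ p ∈ primes, pNew p = false := by
        intro p _
        by_cases h2 : (k : Int) - p = (s : Int)
        · have ht : (((k : Int) - p).toNat : Nat) = s := by omega
          simp only [hpNew, ht, hW, Bool.not_true, Bool.and_false]
        · rw [hpNew]
          simp only [decide_eq_false h2, Bool.false_and, Bool.and_false, Bool.false_and]
      rw [List.filter_congr h0]
      simp
    rw [hnil]
    simp [hW]
  · have hfun : ∀ p : Int, pNew p = decide ((s : Int) + p = (k : Int)) := by
      intro p
      by_cases h2 : (k : Int) - p = (s : Int)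
      · have ht : (((k : Int) - p).toNat : Nat) = s := by omega
        have h3 : (s : Int) + p = (k : Int) := by omega
        have h4 : p ≤ (k : Int) := by omega
        have hWf : WA max_n primes s = false := by simpa using hW
        rw [hpNew]
        simp only [ht, hWf, Bool.not_false, Bool.and_true, decide_eq_true h2,
          decide_eq_true h3, decide_eq_true h4]
      · have h3 : ¬ ((s : Int) + p = (k : Int)) := by omega
        rw [hpNew]
        simp only [decide_eq_false h2, decide_eq_false h3, Bool.false_and, Bool.and_false]
    have hconst : ∀ x ∈ (primes.filter pNew).map f, x = DA max_n primes s + 1 := by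
      intro x hx
      rcases List.mem_map.mp hx with ⟨p, hp, rfl⟩
      have hmem := List.of_mem_filter hp
      rw [hpNew] at hmem
      simp only [Bool.and_eq_true, decide_eq_true_eq] at hmem
      have ht : (((k : Int) - p).toNat : Nat) = s := by omega
      rw [hf]
      simp only [ht]
    rw [pvFoldlMinConst _ _ _ hconst]
    have hiso : ((primes.filter pNew).map f).isEmpty
        = !(primes.any (fun p => decide ((s : Int) + p = (k : Int)))) := by
      rw [List.isEmpty_map, pvFilterIsEmpty]
      rw [funext hfun]
    by_cases hany : (primes.any (fun p => decide ((s : Int) + p = (k : Int))))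
    · rw [hany] at hiso
      simp only [Bool.not_true] at hiso
      simp [hiso, hW, hany]
    · rw [Bool.not_eq_true] at hany
      rw [hany] at hiso
      simp only [Bool.not_false] at hiso
      simp [hiso, hW, hany]

lemma pvDelaySpecSucc (max_n : Int) (primes : List Int) (s k : Nat) :
    delaySpec max_n primes (s + 1) k =
      if (WA max_n primes s) && (primes.any (fun p => decide ((s : Int) + p = (k : Int))))
      then max (delaySpec max_n primes s k) (DA max_n primes s + 1)
      else delaySpec max_n primes s k := by
  set f : Int → Int := fun p => DA max_n primes ((k : Int) - p).toNat + 1 with hf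
  set pOld : Int → Bool := fun p =>
    decide (p ≤ (k : Int)) && decide ((k : Int) - p < (s : Int)) &&
      (WA max_n primes ((k : Int) - p).toNat) with hpOld
  set pNew : Int → Bool := fun p =>
    decide (p ≤ (k : Int)) && decide ((k : Int) - p = (s : Int)) &&
      (WA max_n primes ((k : Int) - p).toNat) with hpNew
  have hsplit : selMax max_n primes (s + 1) k = primes.filter (fun p => pOld p || pNew p) := by
    unfold selMax
    apply List.filter_congr
    intro p _
    simp only [hpOld, hpNew]
    by_cases h2 : (k : Int) - p < (s : Int)
    · have h3 : ¬ ((k : Int) - p = (s : Int)) := by omega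
      have hlt1 : decide ((k : Int) - p < ((s + 1 : Nat) : Int)) = true :=
        decide_eq_true (by push_cast; omega)
      rw [hlt1, decide_eq_true h2, decide_eq_false h3]
      cases hb1 : decide (p ≤ (k : Int)) <;>
        cases hb2 : (WA max_n primes ((k : Int) - p).toNat) <;> rfl
    · by_cases h3 : (k : Int) - p = (s : Int)
      · have hlt1 : decide ((k : Int) - p < ((s + 1 : Nat) : Int)) = true :=
          decide_eq_true (by push_cast; omega)
        rw [hlt1, decide_eq_false h2, decide_eq_true h3]
        cases hb1 : decide (p ≤ (k : Int)) <;>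
          cases hb2 : (WA max_n primes ((k : Int) - p).toNat) <;> rfl
      · have hlt1 : decide ((k : Int) - p < ((s + 1 : Nat) : Int)) = false :=
          decide_eq_false (by push_cast; omega)
        rw [hlt1, decide_eq_false h2, decide_eq_false h3]
        cases hb1 : decide (p ≤ (k : Int)) <;>
          cases hb2 : (WA max_n primes ((k : Int) - p).toNat) <;> rfl
  have hdisj : ∀ p ∈ primes, ¬ (pOld p = true ∧ pNew p = true) := by
    rintro p _ ⟨hA, hB⟩
    rw [hpOld, Bool.and_eq_true, Bool.and_eq_true] at hA
    rw [hpNew, Bool.and_eq_true, Bool.and_eq_true] at hB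
    have h2 := of_decide_eq_true hA.1.2
    have h3 := of_decide_eq_true hB.1.2
    omega
  have hperm := (pvFilterOrPerm pOld pNew primes hdisj).map f
  have hfold : delaySpec max_n primes (s + 1) k
      = ((primes.filter pOld).map f ++ (primes.filter pNew).map f).foldl max 0 := by
    unfold delaySpec
    rw [hsplit]
    rw [hperm.foldl_eq, List.map_append]
  have hold : ((primes.filter pOld).map f).foldl max 0
      = delaySpec max_n primes s k := rfl
  rw [hfold, List.foldl_append, hold]
  by_cases hW : WA max_n primes s
  · have hfun : ∀ p : Int, pNew p = decide ((s : Int) + p = (k : Int)) := by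
      intro p
      by_cases h2 : (k : Int) - p = (s : Int)
      · have ht : (((k : Int) - p).toNat : Nat) = s := by omega
        have h3 : (s : Int) + p = (k : Int) := by omega
        have h4 : p ≤ (k : Int) := by omega
        rw [hpNew]
        simp only [ht, hW, Bool.and_true, decide_eq_true h2, decide_eq_true h3,
          decide_eq_true h4]
      · have h3 : ¬ ((s : Int) + p = (k : Int)) := by omega
        rw [hpNew]
        simp only [decide_eq_false h2, decide_eq_false h3, Bool.false_and, Bool.and_false]
    have hconst : ∀ x ∈ (primes.filter pNew).map f, x = DA max_n primes s + 1 := by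
      intro x hx
      rcases List.mem_map.mp hx with ⟨p, hp, rfl⟩
      have hmem := List.of_mem_filter hp
      rw [hpNew] at hmem
      simp only [Bool.and_eq_true, decide_eq_true_eq] at hmem
      have ht : (((k : Int) - p).toNat : Nat) = s := by omega
      rw [hf]
      simp only [ht]
    rw [pvFoldlMaxConst _ _ _ hconst]
    have hiso : ((primes.filter pNew).map f).isEmpty
        = !(primes.any (fun p => decide ((s : Int) + p = (k : Int)))) := by
      rw [List.isEmpty_map, pvFilterIsEmpty]
      rw [funext hfun]
    by_cases hany : (primes.any (fun p => decide ((s : Int) + p = (k : Int))))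
    · rw [hany] at hiso
      simp only [Bool.not_true] at hiso
      simp [hiso, hW, hany]
    · rw [Bool.not_eq_true] at hany
      rw [hany] at hiso
      simp only [Bool.not_false] at hiso
      simp [hiso, hW, hany]
  · have hnil : primes.filter pNew = [] := by
      have h0 : ∀ p ∈ primes, pNew p = false := by
        intro p _
        by_cases h2 : (k : Int) - p = (s : Int)
        · have ht : (((k : Int) - p).toNat : Nat) = s := by omega
          rw [hpNew]
          simp only [ht]
          rw [Bool.not_eq_true] at hW
          rw [hW, Bool.and_false]
        · rw [hpNew]
          simp only [decide_eq_false h2, Bool.false_and, Bool.and_false]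
      rw [List.filter_congr h0]
      simp
    rw [hnil]
    simp [hW]

-- ---- the push-DP invariant ----
lemma pvBSInv (max_n : Int) (primes : List Int) (hm : 2 ≤ max_n)
    (hS : List.Pairwise (· ≤ ·) primes) (hP : ∀ p ∈ primes, 1 ≤ p) :
    ∀ s : Nat, s ≤ nA max_n →
      ((BS max_n primes s).1.1.length = nA max_n ∧ (BS max_n primes s).1.2.length = nA max_n ∧
       (BS max_n primes s).2.1.length = nA max_n ∧ (BS max_n primes s).2.2.length = nA max_n) ∧
      ∀ k : Nat, k < nA max_n →
        ((BS max_n primes s).1.1.getD k false = if k < s then WA max_n primes k else false) ∧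
        ((BS max_n primes s).1.2.getD k 0 = if k < s then DA max_n primes k else 0) ∧
        ((BS max_n primes s).2.1.getD k 0 = bestSpec max_n primes s k) ∧
        ((BS max_n primes s).2.2.getD k 0 = delaySpec max_n primes s k) := by
  intro s
  induction s with
  | zero =>
    intro _
    rw [pvBSZero]
    refine ⟨⟨by simp [nA], by simp [nA], by simp [nA], by simp [nA]⟩, ?_⟩
    intro k hk
    have hkl : k < (max_n + 1).toNat := by simpa [nA] using hk
    refine ⟨?_, ?_, ?_, ?_⟩
    · rw [List.getD_replicate _ hkl]; simp
    · rw [List.getD_replicate _ hkl]; simp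
    · rw [List.getD_replicate _ hkl, pvBestSpecZero max_n primes hP]
    · rw [List.getD_replicate _ hkl, pvDelaySpecZero max_n primes hP]
  | succ s ih =>
    intro hs1
    have hsn : s < nA max_n := by omega
    obtain ⟨⟨hl1, hl2, hl3, hl4⟩, hent⟩ := ih (by omega)
    have hcast : ((nA max_n : Nat) : Int) = max_n + 1 := by unfold nA; omega
    set st := BS max_n primes s with hstdef
    by_cases hs2 : 2 ≤ s
    · -- s is finalized by the DP recurrence
      have harec := pvArec max_n primes hP s hs2 hsn
      have hbsv : PySem.List.pyGetD st.2.1 (s : Int) 0 = bestSpec max_n primes s s := by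
        rw [PySem.List.pyGetD_natCast]
        exact (hent s hsn).2.2.1
      have hdsv : PySem.List.pyGetD st.2.2 (s : Int) 0 = delaySpec max_n primes s s := by
        rw [PySem.List.pyGetD_natCast]
        exact (hent s hsn).2.2.2
      have hbs2 : bestSpec max_n primes s s
          = ((loseL max_n primes s).map (hkA max_n primes s)).foldl min ((max_n + 1) * 100) := by
        unfold bestSpec
        rw [pvSelMinSelf max_n primes hS hP s]
      have hds2 : delaySpec max_n primes s s
          = ((winL max_n primes s).map (hkA max_n primes s)).foldl max 0 := by
        unfold delaySpec
        rw [pvSelMaxSelf max_n primes hS hP s]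
      have helem : ∀ x ∈ (loseL max_n primes s).map (hkA max_n primes s), x < (max_n + 1) * 100 := by
        intro x hx
        rcases List.mem_map.mp hx with ⟨p, hp, rfl⟩
        obtain ⟨hp1, hple⟩ := pvTwAFacts primes hP (s : Int) p (List.mem_of_mem_filter hp)
        have hb := (pvDABound max_n primes hm hP (((s : Int) - p).toNat)).2
        have hcs : ((((s : Int) - p).toNat : Nat) : Int) ≤ (s : Int) - 1 := by omega
        unfold hkA
        omega
      have hltiff : (bestSpec max_n primes s s < (max_n + 1) * 100)
          ↔ ¬ ((loseL max_n primes s).isEmpty = true) := by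
        rw [hbs2, pvFoldlMinLtIff]
        constructor
        · rintro (h | ⟨x, hx, _⟩)
          · exact absurd h (lt_irrefl _)
          · intro hE
            rw [List.isEmpty_iff] at hE
            rw [hE] at hx
            simp at hx
        · intro hne
          right
          rcases List.exists_mem_of_ne_nil (loseL max_n primes s)
            (by simpa [List.isEmpty_iff] using hne) with ⟨p, hp⟩
          exact ⟨hkA max_n primes s p, List.mem_map_of_mem hp, helem _ (List.mem_map_of_mem hp)⟩
      by_cases hW : WA max_n primes s
      · -- s is a winning position
        have hEf : (loseL max_n primes s).isEmpty = false := by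
          rw [harec.1] at hW
          simpa using hW
        have hlt : bestSpec max_n primes s s < (max_n + 1) * 100 :=
          hltiff.mpr (by simp [hEf])
        have hvalDA : bestSpec max_n primes s s = DA max_n primes s := by
          rw [hbs2, harec.2, if_neg (by simp [hEf])]
        have hwm : finalizeB (max_n + 1) st.1 st.2 (s : Int)
            = (st.1.1.set s true, st.1.2.set s (bestSpec max_n primes s s)) := by
          unfold finalizeB
          rw [if_pos (by exact_mod_cast hs2 : (2 : Int) ≤ (s : Int)), hbsv, if_pos hlt]
          rw [show (((s : Int)).toNat : Nat) = s from by omega]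
        have hwintop : PySem.List.pyGetD (st.1.1.set s true) (s : Int) false = true := by
          rw [PySem.List.pyGetD_natCast]
          exact pvGetDSetSelfBool _ _ _ _ (by rw [hl1]; exact hsn)
        have hbase : PySem.List.pyGetD (st.1.2.set s (bestSpec max_n primes s s)) (s : Int) 0
            = DA max_n primes s := by
          rw [PySem.List.pyGetD_natCast]
          rw [pvGetDSetSelfInt _ _ _ _ (by rw [hl2]; exact hsn)]
          exact hvalDA
        have hstep : BS max_n primes (s + 1)
            = ((st.1.1.set s true, st.1.2.set s (bestSpec max_n primes s s)),
               (st.2.1, pushMax (max_n + 1) (DA max_n primes s + 1) (s : Int)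
                  primes st.2.2)) := by
          rw [pvBSSucc]
          unfold stepB
          rw [hwm]
          unfold pushB
          dsimp only
          rw [hwintop, if_pos rfl, hbase]
        rw [hstep]
        dsimp only
        refine ⟨⟨by simp [hl1], by simp [hl2], hl3, by rw [pvPushMaxLen]; exact hl4⟩, ?_⟩
        intro k hk
        refine ⟨?_, ?_, ?_, ?_⟩
        · by_cases hks : k = s
          · subst hks
            rw [pvGetDSetSelfBool _ _ _ _ (by rw [hl1]; exact hsn), if_pos (by omega)]
            exact hW.symm
          · rw [pvGetDSetNeBool _ _ _ _ _ (fun hh => hks hh.symm)]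
            rw [(hent k hk).1]
            by_cases hlt2 : k < s
            · rw [if_pos hlt2, if_pos (by omega)]
            · rw [if_neg hlt2, if_neg (by omega)]
        · by_cases hks : k = s
          · subst hks
            rw [pvGetDSetSelfInt _ _ _ _ (by rw [hl2]; exact hsn), if_pos (by omega)]
            exact hvalDA
          · rw [pvGetDSetNeInt _ _ _ _ _ (fun hh => hks hh.symm)]
            rw [(hent k hk).2.1]
            by_cases hlt2 : k < s
            · rw [if_pos hlt2, if_pos (by omega)]
            · rw [if_neg hlt2, if_neg (by omega)]
        · rw [(hent k hk).2.2.1, pvBestSpecSucc max_n primes s k, hW]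
          rw [Bool.not_true, Bool.false_and, if_neg Bool.false_ne_true]
        · rw [pvPushMaxGetD (max_n + 1) (DA max_n primes s + 1) (s : Int) (by omega)
            primes st.2.2 k hP (by rw [hl4]; exact hk)
            (by rw [hl4]; exact hcast)]
          rw [(hent k hk).2.2.2, pvDelaySpecSucc max_n primes s k, hW, Bool.true_and]
      · -- s is a losing position
        have hWf : WA max_n primes s = false := by simpa using hW
        have hEt : (loseL max_n primes s).isEmpty = true := by
          rw [harec.1] at hWf
          simpa using hWf
        have hnlt : ¬ (bestSpec max_n primes s s < (max_n + 1) * 100) :=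
          fun h => (hltiff.mp h) hEt
        have hvalDA : delaySpec max_n primes s s = DA max_n primes s := by
          rw [hds2, harec.2, if_pos hEt]
        have hwm : finalizeB (max_n + 1) st.1 st.2 (s : Int)
            = (st.1.1, st.1.2.set s (delaySpec max_n primes s s)) := by
          unfold finalizeB
          rw [if_pos (by exact_mod_cast hs2 : (2 : Int) ≤ (s : Int)), hbsv, if_neg hnlt, hdsv]
          rw [show (((s : Int)).toNat : Nat) = s from by omega]
        have hwintop : PySem.List.pyGetD st.1.1 (s : Int) false = false := by
          rw [PySem.List.pyGetD_natCast, (hent s hsn).1, if_neg (lt_irrefl s)]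
        have hbase : PySem.List.pyGetD (st.1.2.set s (delaySpec max_n primes s s)) (s : Int) 0
            = DA max_n primes s := by
          rw [PySem.List.pyGetD_natCast, pvGetDSetSelfInt _ _ _ _ (by rw [hl2]; exact hsn)]
          exact hvalDA
        have hstep : BS max_n primes (s + 1)
            = ((st.1.1, st.1.2.set s (delaySpec max_n primes s s)),
               (pushMin (max_n + 1) (DA max_n primes s + 1) (s : Int)
                  primes st.2.1, st.2.2)) := by
          rw [pvBSSucc]
          unfold stepB
          rw [hwm]
          unfold pushB
          dsimp only
          rw [hwintop, if_neg Bool.false_ne_true, hbase]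
        rw [hstep]
        dsimp only
        refine ⟨⟨hl1, by simp [hl2], by rw [pvPushMinLen]; exact hl3, hl4⟩, ?_⟩
        intro k hk
        refine ⟨?_, ?_, ?_, ?_⟩
        · rw [(hent k hk).1]
          by_cases hlt2 : k < s
          · rw [if_pos hlt2, if_pos (by omega)]
          · by_cases hks : k = s
            · subst hks
              rw [if_neg hlt2, if_pos (by omega), hWf]
            · rw [if_neg hlt2, if_neg (by omega)]
        · by_cases hks : k = s
          · subst hks
            rw [pvGetDSetSelfInt _ _ _ _ (by rw [hl2]; exact hsn), if_pos (by omega)]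
            exact hvalDA
          · rw [pvGetDSetNeInt _ _ _ _ _ (fun hh => hks hh.symm)]
            rw [(hent k hk).2.1]
            by_cases hlt2 : k < s
            · rw [if_pos hlt2, if_pos (by omega)]
            · rw [if_neg hlt2, if_neg (by omega)]
        · rw [pvPushMinGetD (max_n + 1) (DA max_n primes s + 1) (s : Int) (by omega)
            primes st.2.1 k hP (by rw [hl3]; exact hk)
            (by rw [hl3]; exact hcast)]
          rw [(hent k hk).2.2.1, pvBestSpecSucc max_n primes s k, hWf]
          rw [Bool.not_false, Bool.true_and]
        · rw [(hent k hk).2.2.2, pvDelaySpecSucc max_n primes s k, hWf]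
          rw [Bool.false_and, if_neg Bool.false_ne_true]
    · -- s < 2 : nothing to finalize, position s is losing with 0 moves
      have hW := (pvWABase max_n primes s (by omega)).1
      have hD := (pvWABase max_n primes s (by omega)).2
      have hwm : finalizeB (max_n + 1) st.1 st.2 (s : Int) = st.1 := by
        unfold finalizeB
        rw [if_neg (by exact_mod_cast hs2 : ¬ (2 : Int) ≤ (s : Int))]
      have hwintop : PySem.List.pyGetD st.1.1 (s : Int) false = false := by
        rw [PySem.List.pyGetD_natCast, (hent s hsn).1, if_neg (lt_irrefl s)]
      have hbase : PySem.List.pyGetD st.1.2 (s : Int) 0 = DA max_n primes s := by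
        rw [PySem.List.pyGetD_natCast, (hent s hsn).2.1, if_neg (lt_irrefl s)]
        exact hD.symm
      have hstep : BS max_n primes (s + 1)
          = (st.1, (pushMin (max_n + 1) (DA max_n primes s + 1) (s : Int)
              primes st.2.1, st.2.2)) := by
        rw [pvBSSucc]
        unfold stepB
        rw [hwm]
        unfold pushB
        rw [hwintop, if_neg Bool.false_ne_true, hbase]
      rw [hstep]
      dsimp only
      refine ⟨⟨hl1, hl2, by rw [pvPushMinLen]; exact hl3, hl4⟩, ?_⟩
      intro k hk
      refine ⟨?_, ?_, ?_, ?_⟩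
      · rw [(hent k hk).1]
        by_cases hlt2 : k < s
        · rw [if_pos hlt2, if_pos (by omega)]
        · by_cases hks : k = s
          · subst hks
            rw [if_neg hlt2, if_pos (by omega), hW]
          · rw [if_neg hlt2, if_neg (by omega)]
      · rw [(hent k hk).2.1]
        by_cases hlt2 : k < s
        · rw [if_pos hlt2, if_pos (by omega)]
        · by_cases hks : k = s
          · subst hks
            rw [if_neg hlt2, if_pos (by omega), hD]
          · rw [if_neg hlt2, if_neg (by omega)]
      · rw [pvPushMinGetD (max_n + 1) (DA max_n primes s + 1) (s : Int) (by omega)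
          primes st.2.1 k hP (by rw [hl3]; exact hk)
          (by rw [hl3]; exact hcast)]
        rw [(hent k hk).2.2.1, pvBestSpecSucc max_n primes s k, hW]
        rw [Bool.not_false, Bool.true_and]
      · rw [(hent k hk).2.2.2, pvDelaySpecSucc max_n primes s k, hW]
        rw [Bool.false_and, if_neg Bool.false_ne_true]

-- ===== VERDICT (by name: the statement is the Claim_ definition above) =====
theorem compute_dp_py_spec : Claim_equal_compute_dp_py := by
  intro max_n primes _ hpre
  unfold Spec_compute_dp_py
  by_cases hm1 : max_n ≤ 1
  · simp only [compute_dp_py, compute_dp_py_alt]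
    rw [PySem.List.pyRange_one_eq_nil (by omega : max_n + 1 ≤ 2)]
    rw [List.foldl_nil, if_pos (by omega : max_n < 2)]
  · have hm : 2 ≤ max_n := by omega
    obtain ⟨hS, hP⟩ : List.Pairwise (· ≤ ·) primes ∧ ∀ p ∈ primes, 1 ≤ p := by
      rcases hpre with h | h
      · exact absurd h hm1
      · exact h
    have hcast : ((nA max_n : Nat) : Int) = max_n + 1 := by unfold nA; omega
    have hA : compute_dp_py max_n primes = AS max_n primes (nA max_n) := by
      unfold compute_dp_py AS
      rw [hcast]
    have hB : compute_dp_py_alt max_n primes = (BS max_n primes (nA max_n)).1 := by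
      simp only [compute_dp_py_alt]
      rw [if_neg (by omega : ¬ (max_n < 2))]
      unfold BS
      rw [hcast]
    rw [hA, hB]
    obtain ⟨⟨hL1, hL2, hL3, hL4⟩, hent⟩ := pvBSInv max_n primes hm hS hP (nA max_n) (le_refl _)
    have hlenA := pvASLen max_n primes (nA max_n)
    refine Prod.ext ?_ ?_
    · apply List.ext_getElem (by rw [hlenA.1, hL1])
      intro n h1 h2
      have hn : n < nA max_n := by rw [hlenA.1] at h1; exact h1
      have e1 : (AS max_n primes (nA max_n)).1.getD n false
          = (AS max_n primes (nA max_n)).1[n] := List.getD_eq_getElem _ _ h1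
      have e2 : (BS max_n primes (nA max_n)).1.1.getD n false
          = (BS max_n primes (nA max_n)).1.1[n] := List.getD_eq_getElem _ _ h2
      rw [← e1, ← e2, (hent n hn).1, if_pos hn]
      rfl
    · apply List.ext_getElem (by rw [hlenA.2, hL2])
      intro n h1 h2
      have hn : n < nA max_n := by rw [hlenA.2] at h1; exact h1
      have e1 : (AS max_n primes (nA max_n)).2.getD n 0
          = (AS max_n primes (nA max_n)).2[n] := List.getD_eq_getElem _ _ h1
      have e2 : (BS max_n primes (nA max_n)).1.2.getD n 0
          = (BS max_n primes (nA max_n)).1.2[n] := List.getD_eq_getElem _ _ h2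
      rw [← e1, ← e2, (hent n hn).2.1, if_pos hn]
      rfl
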